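-- pv_equiv track=rewrite | github.com/DevCloudNinjas/DevOps-Projects | tools/repo_consolidation/url_map.py | compute_relative_path
-- ===== SOURCE A (Python) =====
-- def compute_relative_path(from_file: str, to_path: str) -> str:
--     """Compute a POSIX-style relative path from *from_file* to *to_path*.
--
--     Both paths are relative to the repo root.  The result is the relative
--     path from the **directory containing** *from_file* to *to_path*, using
--     forward slashes.
--
--     Examples::
--
--         >>> compute_relative_path("project-13/README.md", "project-30/README.md")
--         '../project-30/README.md'
--         >>> compute_relative_path("learning/k8s/README.md", "learning/k8s/docs/setup.md")
--         'docs/setup.md'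
--     """
--     from pathlib import PurePosixPath
--
--     src_dir = PurePosixPath(from_file).parent
--     target = PurePosixPath(to_path)
--
--     # Compute the relative path between the two POSIX paths.
--     try:
--         rel = target.relative_to(src_dir)
--     except ValueError:
--         # target is not under src_dir — walk up and across.
--         src_parts = src_dir.parts
--         tgt_parts = target.parts
--
--         # Find the length of the common prefix.
--         common = 0
--         for s, t in zip(src_parts, tgt_parts):
--             if s == t:
--                 common += 1
--             else:
--                 break
--
--         ups = len(src_parts) - common
--         remainder = tgt_parts[common:]
--         rel = PurePosixPath(*([".."] * ups + list(remainder)))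
--
--     return str(rel)
-- ===== SOURCE B (Python) =====
-- def compute_relative_path(from_file: str, to_path: str) -> str:
--     """POSIX relative path from the directory containing *from_file* to *to_path*
--     (both given relative to the repo root)."""
--     src = [p for p in from_file.split("/") if p and p != "."][:-1]
--     tgt = [p for p in to_path.split("/") if p and p != "."]
--     common = 0
--     while common < len(src) and common < len(tgt) and src[common] == tgt[common]:
--         common += 1
--     parts = [".."] * (len(src) - common) + tgt[common:]
--     return "/".join(parts) if parts else "."
-- ===== Notes on version B (the rewrite author's own statement) =====
-- stated objective: simpler
-- what changed: B replaces A's try/except relative_to fast path plus hand-written fallback by one uniform common-prefix walk over the split path components; Pre_ restricts to the documented domain of repo-root-relative paths (no leading '/'), where pathlib's absolute-root parsing that A inherits never applies.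
-- outside the precondition, e.g. on compute_relative_path('/a/b.md', 'c/d'): A returns '../../c/d', B returns '../c/d'
import Mathlib
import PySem

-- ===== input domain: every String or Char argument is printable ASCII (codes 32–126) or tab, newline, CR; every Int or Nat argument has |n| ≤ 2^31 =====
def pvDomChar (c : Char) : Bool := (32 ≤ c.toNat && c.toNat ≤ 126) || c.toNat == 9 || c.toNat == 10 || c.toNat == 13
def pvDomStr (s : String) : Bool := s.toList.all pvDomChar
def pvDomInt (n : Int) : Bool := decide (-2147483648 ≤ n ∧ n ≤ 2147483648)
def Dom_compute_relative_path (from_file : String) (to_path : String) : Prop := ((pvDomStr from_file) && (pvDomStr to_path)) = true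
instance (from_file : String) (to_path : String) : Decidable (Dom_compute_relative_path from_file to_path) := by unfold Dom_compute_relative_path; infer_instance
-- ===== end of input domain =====

-- B replaces A's try/except (library relative_to fast path, then a hand-written walk-up
-- fallback) by one uniform common-prefix walk over the split components — simpler: one
-- code path, no exception flow. Pre_ restricts to repo-root-relative paths (no leading '/').

-- ===== PORT A =====
-- Hand port of PurePosixPath(s).parts for RELATIVE paths: split on '/', drop empty and
-- '.' pieces. Exact whenever s does not start with '/' (Pre_ excludes absolute paths,
-- where pathlib would add a root part).
def pvParts (s : String) : List String :=
  ((PySem.Chars.splitOn s.toList "/".toList).map String.ofList).filter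
    (fun c => !(c == "" || c == "."))

-- Hand port of str(PurePosixPath(*tokens)) for relative tokens (no token is a root):
-- '.' for the empty path, else the components joined with '/'. Exact on that domain.
def pvJoinRel (tokens : List String) : String :=
  if tokens = [] then "." else PySem.Str.join "/" tokens

-- A: try target.relative_to(src_dir) — for relative pure paths this succeeds exactly
-- when src_dir's parts are a prefix of target's parts (exact under Pre_) — else the
-- fallback with its for/break common-prefix counter over zip.
def compute_relative_path (from_file : String) (to_path : String) : String :=
  let scomps := (pvParts from_file).dropLast      -- .parent drops the last component
  let tcomps := pvParts to_path
  if List.IsPrefix scomps tcomps then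
    -- relative_to succeeded: rel.parts = tcomps.drop scomps.length; str(rel)
    pvJoinRel (tcomps.drop scomps.length)
  else
    -- for s, t in zip(src_parts, tgt_parts): if s == t: common += 1 else: break
    let common := ((List.zip scomps tcomps).foldl
      (fun (st : Bool × Nat) p =>
        if st.1 then st else if p.1 = p.2 then (false, st.2 + 1) else (true, st.2))
      (false, 0)).2
    pvJoinRel (List.replicate (scomps.length - common) ".." ++ tcomps.drop common)

-- ===== PORT B =====
-- while common < len(src) and common < len(tgt) and src[common] == tgt[common]: common += 1
def pvCommonLen : List String → List String → Nat
  | s :: ss, t :: ts => if s = t then pvCommonLen ss ts + 1 else 0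
  | _, _ => 0

def compute_relative_path_alt (from_file : String) (to_path : String) : String :=
  let src := (pvParts from_file).dropLast
  let tgt := pvParts to_path
  let common := pvCommonLen src tgt
  let parts := List.replicate (src.length - common) ".." ++ tgt.drop common
  if parts = [] then "." else PySem.Str.join "/" parts

-- ===== PRECONDITION & SPEC =====
-- Pre_ excludes paths with a leading '/': the function is documented for paths relative
-- to the repo root, and on absolute inputs A's value comes from pathlib's root parsing,
-- outside the task's natural domain.
def Pre_compute_relative_path (from_file : String) (to_path : String) : Prop :=
  PySem.Str.startswith from_file "/" = false ∧ PySem.Str.startswith to_path "/" = false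
instance (from_file : String) (to_path : String) : Decidable (Pre_compute_relative_path from_file to_path) := by unfold Pre_compute_relative_path; infer_instance

def pvWitness_compute_relative_path : String × String :=
  ("project-13/README.md", "project-30/README.md")

def Spec_compute_relative_path (from_file : String) (to_path : String) (out : String) : Prop := out = compute_relative_path_alt from_file to_path
instance (from_file : String) (to_path : String) (out : String) : Decidable (Spec_compute_relative_path from_file to_path out) := by unfold Spec_compute_relative_path; infer_instance

-- ===== CLAIM =====
def Claim_equal_compute_relative_path : Prop := ∀ (from_file : String) (to_path : String), Dom_compute_relative_path from_file to_path → Pre_compute_relative_path from_file to_path → Spec_compute_relative_path from_file to_path (compute_relative_path from_file to_path)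

-- ===== LEMMAS AND PROOFS =====

-- once the for/break loop has stopped, the fold is constant
lemma pvFold_stopped (l : List (String × String)) (n : Nat) :
    l.foldl (fun (st : Bool × Nat) p =>
      if st.1 then st else if p.1 = p.2 then (false, st.2 + 1) else (true, st.2))
      (true, n) = (true, n) := by
  induction l with
  | nil => rfl
  | cons p l ih => simpa using ih

-- A's for/break counter over zip computes B's recursive common-prefix length
lemma pvFold_eq_commonLen (s t : List String) (n : Nat) :
    ((List.zip s t).foldl (fun (st : Bool × Nat) p =>
      if st.1 then st else if p.1 = p.2 then (false, st.2 + 1) else (true, st.2))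
      (false, n)).2 = n + pvCommonLen s t := by
  induction s generalizing t n with
  | nil => simp [pvCommonLen]
  | cons x ss ih =>
    cases t with
    | nil => simp [pvCommonLen]
    | cons y ts =>
      by_cases h : x = y
      · subst h
        simp only [List.zip_cons_cons, List.foldl_cons, Bool.false_eq_true, if_false,
          ite_true]
        rw [ih ts (n + 1)]
        simp [pvCommonLen]
        omega
      · simp [List.zip, h, pvCommonLen, pvFold_stopped]

lemma pvCommonLen_prefix (s t : List String) (h : List.IsPrefix s t) :
    pvCommonLen s t = s.length := by
  induction s generalizing t with
  | nil => simp [pvCommonLen]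
  | cons x ss ih =>
    obtain ⟨r, rfl⟩ := h
    simp [pvCommonLen, ih (ss ++ r) ⟨r, rfl⟩]

-- ===== VERDICT =====
theorem compute_relative_path_spec : Claim_equal_compute_relative_path := by
  intro from_file to_path _ _
  unfold Spec_compute_relative_path compute_relative_path compute_relative_path_alt
  by_cases h : List.IsPrefix ((pvParts from_file).dropLast) (pvParts to_path)
  · simp only [h, if_pos, pvCommonLen_prefix _ _ h, pvJoinRel]
    simp
  · simp only [h, if_neg, not_false_iff]
    rw [pvFold_eq_commonLen]
    simp [pvJoinRel]
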